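-- pv_equiv track=rewrite | github.com/4xel-C/leet_code_submissions | easy/561_array_partition.py | bucket_solution
-- ===== SOURCE A (Python) =====
-- from typing import List
--
-- def bucket_solution(nums: List[int]) -> int:
--     """Bucket sort solution -> bucket sort allow O(n) sorting, which show a big imporovment compare to the O(nlogn) method from the classic sort.
--     We do need to take into consideration the range of the list to set up correctly the bucket.
--
--     Args:
--         nums (List[int]): list of numbers
--
--     Returns:
--         int: the result
--     """
--     # initialize result:
--     result = 0
--     bucket = [0] * 20000
--
--     # Sort by using a bucket count (take down from -10000 up to 10000 numbers)
--     for num in nums: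
--         bucket[num + 10000] += 1
--
--     # Initialize the flag to true (to know when to pick up the number -> 1 / 2 )
--     flag = True
--     # Iterate through the bucket and add each 2 numbers (the minimum one)
--     for i in range(len(bucket)):
--         while bucket[i]:
--             # add the number to the result if flagged
--             if flag:
--                 result += i - 10_000
--
--             # substract 1 number count
--             bucket[i] -= 1
--
--             # reverse the flag
--             flag = not flag
--
--     return result
-- ===== SOURCE B (Python) =====
-- def bucket_solution(nums):
--     """Classic sort-and-slice solution: sort once, then sum every other
--     element of the sorted list (each pair's minimum)."""
--     return sum(sorted(nums)[::2])
-- ===== Notes on version B (the rewrite author's own statement) =====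
-- stated objective: idiomatic
-- what changed: B replaces A's fixed 20000-slot count-array walk (bucket sort with a pick-every-other flag) by the canonical one-liner: comparison-sort the list once and sum the elements at even indices of the sorted copy.
-- intended difference: On lists containing an element between -30000 and -10001, A's bucket index num+10000 is negative and Python silently wraps it, so A counts that element as num+20000 and returns the wrong sum (e.g. A([-10001]) = 9999), while B returns the true sum of the pair minima (-10001 there), which is the intended value. — e.g. on bucket_solution([-10001]): A returns 9999, B returns -10001
import Mathlib
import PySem

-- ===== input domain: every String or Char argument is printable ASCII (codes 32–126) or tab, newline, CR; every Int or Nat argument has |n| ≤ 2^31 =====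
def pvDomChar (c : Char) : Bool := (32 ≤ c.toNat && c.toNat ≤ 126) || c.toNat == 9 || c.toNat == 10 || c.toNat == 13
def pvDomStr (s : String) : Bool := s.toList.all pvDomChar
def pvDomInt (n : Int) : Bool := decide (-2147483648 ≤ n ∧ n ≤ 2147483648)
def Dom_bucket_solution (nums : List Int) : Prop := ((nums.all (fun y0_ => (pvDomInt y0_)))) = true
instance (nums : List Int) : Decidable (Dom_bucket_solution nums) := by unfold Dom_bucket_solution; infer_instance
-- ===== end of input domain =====

-- B: idiomatic sort-and-slice (sum of the even-index elements of a sorted copy) instead of A's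
-- fixed 20000-slot count-array walk; on elements between -30000 and -10001 A's negative bucket index
-- wraps around and A returns a wrong sum — B returns the intended value there (see D_ below).


-- ===== PORT A =====
-- inner 'while bucket[i]:' loop of A: the count bucket[i] is a non-negative integer, so the loop
-- runs exactly cnt times, adding i - 10000 on every pass where the flag is set and flipping the flag.
def bsInner (v : Int) (cnt : Nat) (st : Int × Bool) : Int × Bool :=
  match cnt with
  | 0 => st
  | Nat.succ n => bsInner v n (if st.2 then st.1 + v else st.1, !st.2)

-- The Python list 'bucket = [0] * 20000' is modeled as a total function Int → Int.
-- 'bucket[num + 10000] += 1': Python wraps a negative index; for num + 10000 ∈ [-20000, 19999]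
-- (exactly the inputs Pre_ admits — outside them Python raises IndexError) the effective index
-- is Int.emod (num + 10000) 20000, which is exact there.
def bucket_solution (nums : List Int) : Int :=
  let bucket : Int → Int :=
    nums.foldl (fun b num => fun j => if j = Int.emod (num + 10000) 20000 then b j + 1 else b j)
      (fun _ => 0)
  let st := (PySem.List.pyRange 0 20000 1).foldl
      (fun st i => bsInner (i - 10000) (bucket i).toNat st) ((0 : Int), true)
  st.1

-- ===== PORT B =====
-- sum(sorted(nums)[::2]); the step 2 is non-zero, so the slice never raises (getD is never hit)
def bucket_solution_alt (nums : List Int) : Int :=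
  ((PySem.List.slice? (PySem.List.sorted nums (fun x => x) false) none none 2).getD []).sum

-- ===== PRECONDITION & SPEC =====
-- Exactly the inputs on which A returns: for an element num ≥ 10000 or num < -30000 the bucket
-- index num + 10000 is out of range for the 20000-slot list and Python raises IndexError.
def Pre_bucket_solution (nums : List Int) : Prop := ∀ x ∈ nums, -30000 ≤ x ∧ x < 10000
instance (nums : List Int) : Decidable (Pre_bucket_solution nums) := by
  unfold Pre_bucket_solution; infer_instance

def pvWitness_bucket_solution : List Int := [3, -1, 2, 4]

-- On lists containing an element between -30000 and -10001, A's bucket index num + 10000 is negative and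
-- Python silently wraps it, so A counts that element as num + 20000 and returns the wrong sum
-- (e.g. A [-10001] = 9999), while B returns the true sum of the pair minima (-10001 there),
-- which is the intended value.
def D_bucket_solution (nums : List Int) : Prop := ∃ x ∈ nums, x < -10000
instance (nums : List Int) : Decidable (D_bucket_solution nums) := by
  unfold D_bucket_solution; infer_instance

def Spec_bucket_solution (nums : List Int) (out : Int) : Prop :=
  ¬ D_bucket_solution nums → out = bucket_solution_alt nums
instance (nums : List Int) (out : Int) : Decidable (Spec_bucket_solution nums out) := by
  unfold Spec_bucket_solution; infer_instance

def pvDiffWitness_bucket_solution : List Int := [-10001]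
def pvDiffWitnessOut_bucket_solution : Int × Int := (9999, -10001)

-- ===== CLAIM (what is proved, stated in full; the proofs are below) =====
def Claim_unchanged_bucket_solution : Prop := ∀ (nums : List Int), Dom_bucket_solution nums → Pre_bucket_solution nums → Spec_bucket_solution nums (bucket_solution nums)
def Claim_changed_bucket_solution : Prop := Dom_bucket_solution (pvDiffWitness_bucket_solution) ∧ Pre_bucket_solution (pvDiffWitness_bucket_solution) ∧ D_bucket_solution (pvDiffWitness_bucket_solution) ∧ bucket_solution (pvDiffWitness_bucket_solution) = pvDiffWitnessOut_bucket_solution.1 ∧ bucket_solution_alt (pvDiffWitness_bucket_solution) = pvDiffWitnessOut_bucket_solution.2 ∧ pvDiffWitnessOut_bucket_solution.1 ≠ pvDiffWitnessOut_bucket_solution.2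
def Claim_exact_bucket_solution : Prop := ∀ (nums : List Int), Dom_bucket_solution nums → Pre_bucket_solution nums → D_bucket_solution nums → bucket_solution nums ≠ bucket_solution_alt nums

-- ===== LEMMAS AND PROOFS =====

-- the flag-alternating accumulation step both of A's loops perform
def altStep (st : Int × Bool) (x : Int) : Int × Bool := (if st.2 then st.1 + x else st.1, !st.2)

-- the elements at even indices (what the slice [::2] selects)
def evens : List Int → List Int
  | [] => []
  | [x] => [x]
  | x :: _ :: xs => x :: evens xs

-- A's count array, named for the proofs (definitionally the fold the port performs)
def bucketOf (nums : List Int) : Int → Int :=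
  nums.foldl (fun b num => fun j => if j = Int.emod (num + 10000) 20000 then b j + 1 else b j)
    (fun _ => 0)

-- the value sequence A's second loop walks through: each bucket's value, repeated count-many times
def emitted (nums : List Int) : List Int :=
  ((PySem.List.pyRange 0 20000 1).map
    (fun i => List.replicate (bucketOf nums i).toNat (i - 10000))).flatten

-- the value A's wrapped bucket index effectively counts an element as
def wrapVal (x : Int) : Int := if x < -10000 then x + 20000 else x

theorem evens_cons_drop (y : Int) (xs : List Int) : evens (y :: xs) = y :: evens (xs.drop 1) := by
  cases xs <;> simp [evens]

theorem bsInner_eq_foldl (v : Int) (cnt : Nat) (st : Int × Bool) :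
    bsInner v cnt st = (List.replicate cnt v).foldl altStep st := by
  induction cnt generalizing st with
  | zero => rfl
  | succ n ih => simp [bsInner, List.replicate_succ, List.foldl_cons, altStep, ih]

theorem foldl_altStep_evens (l : List Int) :
    ∀ t : Int, (l.foldl altStep (t, true)).1 = t + (evens l).sum ∧
      (l.foldl altStep (t, false)).1 = t + (evens (l.drop 1)).sum := by
  induction l using evens.induct with
  | case1 => intro t; simp [evens]
  | case2 x => intro t; simp [evens, altStep]
  | case3 x y xs ih =>
    intro t
    constructor
    · simp only [List.foldl_cons, altStep]
      simp
      rw [(ih (t + x)).1, evens_cons_drop]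
      simp; ring
    · simp only [List.foldl_cons, altStep]
      simp
      rw [(ih (t + y)).2]
      simp [evens_cons_drop]; ring

theorem filterMap_getElem_evens (l : List Int) :
    (List.range ((l.length + 1) / 2)).filterMap (fun k => l[2 * k]?) = evens l := by
  induction l using evens.induct with
  | case1 => simp [evens]
  | case2 x => simp [evens]
  | case3 x y xs ih =>
    have hlen : (((x :: y :: xs).length + 1) / 2) = ((xs.length + 1) / 2) + 1 := by
      simp [List.length_cons]; omega
    rw [hlen, List.range_succ_eq_map, List.filterMap_cons, List.filterMap_map]
    simp only [Nat.mul_zero, List.getElem?_cons_zero]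
    have hfn : (fun k => (x :: y :: xs)[2 * k]?) ∘ Nat.succ = fun k => xs[2 * k]? := by
      funext k
      show (x :: y :: xs)[2 * (k + 1)]? = xs[2 * k]?
      rw [show 2 * (k + 1) = (2 * k) + 1 + 1 from by ring]
      simp
    rw [hfn, ih]
    simp [evens]

theorem slice2_eq_evens (l : List Int) :
    PySem.List.slice? l none none 2 = some (evens l) := by
  rw [← filterMap_getElem_evens]
  simp only [PySem.List.slice?, PySem.List.sliceIndices]
  norm_num
  have hc : (if 0 < l.length then (((l.length : Int) + 2 - 1) / 2).toNat else 0) = (l.length + 1) / 2 := by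
    split_ifs with h
    · omega
    · omega
  rw [hc]
  congr 1

theorem bucket_char (nums : List Int) (b0 : Int → Int) (j : Int) :
    (nums.foldl (fun b num => fun j => if j = Int.emod (num + 10000) 20000 then b j + 1 else b j) b0) j
      = b0 j + (nums.countP (fun num => Int.emod (num + 10000) 20000 == j) : Int) := by
  induction nums generalizing b0 with
  | nil => simp
  | cons n ns ih =>
    simp only [List.foldl_cons]
    rw [ih]
    simp only [List.countP_cons]
    by_cases h : Int.emod (n + 10000) 20000 = j
    · rw [if_pos h.symm]
      simp only [h, beq_self_eq_true, if_true]
      push_cast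
      ring
    · rw [if_neg (fun he => h he.symm)]
      have hb : (Int.emod (n + 10000) 20000 == j) = false := by
        simp [h]
      rw [hb]
      simp

theorem map_ite_zero_sum (l : List Int) (c : Int → Nat) (v : Int) (hv : v ∉ l) :
    ((l.map (fun i => if i = v then c i else 0)).sum) = 0 := by
  apply List.sum_eq_zero
  intro x hx
  obtain ⟨i, hi, rfl⟩ := List.mem_map.mp hx
  have : i ≠ v := fun h => hv (h ▸ hi)
  simp [this]

theorem sum_map_ite_nodup (l : List Int) (c : Int → Nat) (v : Int) (hnd : l.Nodup) :
    ((l.map (fun i => if i = v then c i else 0)).sum) = if v ∈ l then c v else 0 := by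
  induction l with
  | nil => simp
  | cons a as ih =>
    simp only [List.nodup_cons] at hnd
    by_cases h : a = v
    · subst h
      simp [hnd.1, map_ite_zero_sum as c a hnd.1]
    · simp [h, ih hnd.2, Ne.symm h]

theorem emod_wrap (x : Int) (h1 : -30000 ≤ x) (h2 : x < 10000) :
    Int.emod (x + 10000) 20000 = wrapVal x + 10000 := by
  unfold wrapVal
  have he : Int.emod (x + 10000) 20000 = (x + 10000) % 20000 := rfl
  rw [he]
  split_ifs with h <;> omega

theorem wrapVal_range (x : Int) (h1 : -30000 ≤ x) (h2 : x < 10000) :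
    -10000 ≤ wrapVal x ∧ wrapVal x < 10000 := by
  unfold wrapVal; split_ifs with h <;> omega

theorem bucketOf_eq_count (nums : List Int) (hpre : ∀ x ∈ nums, -30000 ≤ x ∧ x < 10000) (j : Int) :
    bucketOf nums j = (nums.countP (fun num => wrapVal num + 10000 == j) : Int) := by
  unfold bucketOf
  rw [bucket_char]
  simp only [zero_add]
  congr 1
  apply List.countP_congr
  intro x hx
  rw [emod_wrap x (hpre x hx).1 (hpre x hx).2]

theorem count_emitted (nums : List Int) (hpre : ∀ x ∈ nums, -30000 ≤ x ∧ x < 10000) (v : Int) :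
    (emitted nums).count v = (nums.map wrapVal).count v := by
  unfold emitted
  rw [List.count_flatten, List.map_map]
  have hmap : ((PySem.List.pyRange 0 20000 1).map
      (List.count v ∘ fun i => List.replicate (bucketOf nums i).toNat (i - 10000)))
      = (PySem.List.pyRange 0 20000 1).map (fun i => if i = v + 10000 then (bucketOf nums i).toNat else 0) := by
    apply List.map_congr_left
    intro i _
    simp only [Function.comp_apply, List.count_replicate]
    by_cases h : i = v + 10000
    · have : (i - 10000 == v) = true := by simp; omega
      rw [this]; simp [h]
    · have : (i - 10000 == v) = false := by simp; omega
      rw [this]; simp [h]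
  rw [hmap, sum_map_ite_nodup _ _ _ (PySem.List.nodup_pyRange_one 0 20000)]
  have hcnt : (nums.map wrapVal).count v = nums.countP (fun num => wrapVal num == v) := by
    rw [List.count_eq_countP, List.countP_map]
    rfl
  by_cases hv : v + 10000 ∈ PySem.List.pyRange 0 20000 1
  · rw [if_pos hv]
    rw [bucketOf_eq_count nums hpre]
    have : nums.countP (fun num => wrapVal num + 10000 == v + 10000)
        = nums.countP (fun num => wrapVal num == v) := by
      apply List.countP_congr
      intro x _
      simp
    rw [this, hcnt]
    simp
  · rw [if_neg hv]
    have hvout : ¬ (-10000 ≤ v ∧ v < 10000) := by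
      intro h
      exact hv (PySem.List.mem_pyRange_one.mpr (by omega))
    rw [hcnt]
    symm
    rw [List.countP_eq_zero]
    intro x hx
    have hw := wrapVal_range x (hpre x hx).1 (hpre x hx).2
    simp
    omega

theorem emitted_pairwise (nums : List Int) : (emitted nums).Pairwise (· ≤ ·) := by
  unfold emitted
  rw [List.pairwise_flatten]
  constructor
  · intro l hl
    obtain ⟨i, _, rfl⟩ := List.mem_map.mp hl
    exact List.pairwise_replicate.mpr (Or.inr le_rfl)
  · rw [List.pairwise_map]
    apply List.Pairwise.imp_of_mem ?_ (PySem.List.pairwise_lt_pyRange_one 0 20000)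
    intro i i' _ _ hlt x hx y hy
    rw [List.eq_of_mem_replicate hx, List.eq_of_mem_replicate hy]
    omega

theorem sorted_eq_emitted (nums : List Int) (hpre : ∀ x ∈ nums, -30000 ≤ x ∧ x < 10000) :
    PySem.List.sorted (nums.map wrapVal) (fun x => x) false = emitted nums := by
  apply PySem.List.sorted_id_eq_of_perm_of_pairwise
  · exact List.perm_iff_count.mpr (fun v => count_emitted nums hpre v)
  · exact emitted_pairwise nums

theorem outer_foldl (nums : List Int) (init : Int × Bool) :
    (PySem.List.pyRange 0 20000 1).foldl
        (fun st i => bsInner (i - 10000) (bucketOf nums i).toNat st) init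
      = (emitted nums).foldl altStep init := by
  unfold emitted
  rw [List.foldl_flatten, List.foldl_map]
  have hfn : (fun (st : Int × Bool) (i : Int) => bsInner (i - 10000) (bucketOf nums i).toNat st)
      = fun st i => (List.replicate (bucketOf nums i).toNat (i - 10000)).foldl altStep st := by
    funext st i
    exact bsInner_eq_foldl _ _ _
  rw [hfn]

theorem A_evens_sum (nums : List Int) (hpre : ∀ x ∈ nums, -30000 ≤ x ∧ x < 10000) :
    bucket_solution nums = (evens (PySem.List.sorted (nums.map wrapVal) (fun x => x) false)).sum := by
  rw [sorted_eq_emitted nums hpre]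
  show ((PySem.List.pyRange 0 20000 1).foldl
      (fun st i => bsInner (i - 10000) (bucketOf nums i).toNat st) ((0 : Int), true)).1 = _
  rw [outer_foldl, (foldl_altStep_evens (emitted nums) 0).1]
  ring

theorem B_evens_sum (l : List Int) :
    bucket_solution_alt l = (evens (PySem.List.sorted l (fun x => x) false)).sum := by
  unfold bucket_solution_alt
  rw [slice2_eq_evens]
  rfl

theorem countP_take_ge (v : List Int) (hv : v.Pairwise (· ≤ ·)) (i : Nat) (hi : i < v.length)
    (w : Int) (hw : v[i] < w) : i + 1 ≤ v.countP (fun y => decide (y < w)) := by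
  conv_rhs => rw [← List.take_append_drop (i+1) v]
  rw [List.countP_append]
  have hlen : (v.take (i+1)).length = i + 1 := by
    rw [List.length_take]; omega
  have hall : (v.take (i+1)).countP (fun y => decide (y < w)) = (v.take (i+1)).length := by
    rw [List.countP_eq_length]
    intro a ha
    obtain ⟨j, hj, rfl⟩ := List.mem_iff_getElem.mp ha
    rw [List.getElem_take]
    have hji : j < i + 1 := by rw [hlen] at hj; exact hj
    have : v[j] ≤ v[i] := by
      rcases Nat.lt_or_ge j i with h | h
      · exact (List.pairwise_iff_getElem.mp hv) j i (by omega) hi h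
      · have : j = i := by omega
        subst this; rfl
    simp; omega
  omega

theorem countP_lt_self_le (t : List Int) (ht : t.Pairwise (· ≤ ·)) (i : Nat) (hi : i < t.length)
    (w : Int) (hw : w ≤ t[i]) : t.countP (fun y => decide (y < w)) ≤ i := by
  conv_lhs => rw [← List.take_append_drop i t]
  rw [List.countP_append]
  have h0 : (t.drop i).countP (fun y => decide (y < w)) = 0 := by
    rw [List.countP_eq_zero]
    intro a ha
    obtain ⟨j, hj, rfl⟩ := List.mem_iff_getElem.mp ha
    have hjt : i + j < t.length := by simp at hj; omega
    rw [List.getElem_drop]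
    have : t[i] ≤ t[i + j] := by
      rcases Nat.eq_or_lt_of_le (Nat.le_add_right i j) with h | h
      · simp [← h]
      · exact (List.pairwise_iff_getElem.mp ht) i (i+j) hi (by simp at hj ⊢; omega) h
    simp; omega
  have h1 : (t.take i).countP (fun y => decide (y < w)) ≤ i := by
    calc (t.take i).countP _ ≤ (t.take i).length := List.countP_le_length
    _ ≤ i := by rw [List.length_take]; omega
  omega

theorem sorted_dominates (l : List Int) (f : Int → Int) (hf : ∀ x ∈ l, x ≤ f x) :
    List.Forall₂ (· ≤ ·) (PySem.List.sorted l (fun x => x) false)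
      (PySem.List.sorted (l.map f) (fun x => x) false) := by
  rw [List.forall₂_iff_get]
  have hlt : (PySem.List.sorted l (fun x => x) false).length = l.length := by
    simp [PySem.List.length_sorted]
  have hlv : (PySem.List.sorted (l.map f) (fun x => x) false).length = l.length := by
    simp [PySem.List.length_sorted]
  refine ⟨by rw [hlt, hlv], ?_⟩
  intro i h1 h2
  simp only [List.get_eq_getElem]
  by_contra hlt2
  rw [not_le] at hlt2
  set t := PySem.List.sorted l (fun x => x) false with hts
  set v := PySem.List.sorted (l.map f) (fun x => x) false with hvs
  set w := t[i] with hws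
  have hc1 : i + 1 ≤ v.countP (fun y => decide (y < w)) :=
    countP_take_ge v (PySem.List.sorted_pairwise _ _) i h2 w hlt2
  have hc2 : v.countP (fun y => decide (y < w)) = (l.map f).countP (fun y => decide (y < w)) :=
    (PySem.List.sorted_perm _ _ _).countP_eq _
  have hc3 : (l.map f).countP (fun y => decide (y < w)) = l.countP (fun x => decide (f x < w)) := by
    rw [List.countP_map]; rfl
  have hc4 : l.countP (fun x => decide (f x < w)) ≤ l.countP (fun x => decide (x < w)) := by
    apply List.countP_mono_left
    intro x hx h
    have := hf x hx
    simp at h ⊢; omega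
  have hc5 : l.countP (fun x => decide (x < w)) = t.countP (fun x => decide (x < w)) :=
    ((PySem.List.sorted_perm _ _ _).countP_eq _).symm
  have hc6 : t.countP (fun y => decide (y < w)) ≤ i :=
    countP_lt_self_le t (PySem.List.sorted_pairwise _ _) i h1 w le_rfl
  omega

theorem evens_forall₂ : ∀ (t v : List Int), List.Forall₂ (· ≤ ·) t v →
    List.Forall₂ (· ≤ ·) (evens t) (evens v) := by
  intro t
  induction t using evens.induct with
  | case1 =>
    intro v h
    cases h
    simp [evens]
  | case2 x =>
    intro v h
    rcases h with _ | ⟨hxy, h'⟩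
    cases h'
    simp [evens]
    assumption
  | case3 x y xs ih =>
    intro v h
    rcases h with _ | ⟨hxy, h2⟩
    rcases h2 with _ | ⟨hy2, h3⟩
    simp only [evens]
    exact List.Forall₂.cons hxy (ih _ h3)

theorem evens_sum_lt (a b : Int) (t' v' : List Int) (hab : a < b)
    (h : List.Forall₂ (· ≤ ·) (a :: t') (b :: v')) :
    (evens (a :: t')).sum < (evens (b :: v')).sum := by
  have h2 := evens_forall₂ _ _ h
  rw [evens_cons_drop, evens_cons_drop] at h2 ⊢
  rcases h2 with _ | ⟨_, h3⟩
  simp only [List.sum_cons]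
  have := List.Forall₂.sum_le_sum h3
  omega

-- ===== VERDICT (by name: the statement is the Claim_ definition above) =====
theorem bucket_solution_spec : Claim_unchanged_bucket_solution := by
  intro nums _ hpre hnd
  have hmap : nums.map wrapVal = nums := by
    have h : ∀ x ∈ nums, wrapVal x = id x := by
      intro x hx
      unfold wrapVal
      rw [if_neg (fun hlt => hnd ⟨x, hx, hlt⟩)]
      rfl
    rw [List.map_congr_left h, List.map_id]
  show bucket_solution nums = bucket_solution_alt nums
  rw [A_evens_sum nums hpre, hmap, ← B_evens_sum]

set_option maxRecDepth 1000000 in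
theorem bucket_solution_changed : Claim_changed_bucket_solution := by
  unfold Claim_changed_bucket_solution; decide

theorem bucket_solution_tight : Claim_exact_bucket_solution := by
  intro nums _ hpre hd
  obtain ⟨wv, hwmem, hwlt⟩ := hd
  rw [A_evens_sum nums hpre, B_evens_sum]
  have hdom := sorted_dominates nums wrapVal (by
    intro x _
    unfold wrapVal
    split_ifs with h <;> omega)
  cases ht : PySem.List.sorted nums (fun x => x) false with
  | nil =>
    exfalso
    have : nums = [] := (PySem.List.sorted_eq_nil_iff nums (fun x => x) false).mp ht
    subst this
    exact absurd hwmem (List.not_mem_nil)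
  | cons a t' =>
    cases hv : PySem.List.sorted (nums.map wrapVal) (fun x => x) false with
    | nil =>
      rw [ht, hv] at hdom
      cases hdom
    | cons b v' =>
      rw [ht, hv] at hdom
      have hab : a < b := by
        have ha : a ≤ wv := PySem.List.key_head_sorted_le nums (fun x => x) ht wv hwmem
        have hb : -10000 ≤ b := by
          have hbmem : b ∈ nums.map wrapVal := by
            have : b ∈ PySem.List.sorted (nums.map wrapVal) (fun x => x) false := by
              rw [hv]; exact List.mem_cons_self
            exact (PySem.List.mem_sorted _ _ _ _).mp this
          obtain ⟨x, hx, rfl⟩ := List.mem_map.mp hbmem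
          exact (wrapVal_range x (hpre x hx).1 (hpre x hx).2).1
        omega
      exact Ne.symm (ne_of_lt (evens_sum_lt a b t' v' hab hdom))
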